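-- pv_equiv track=rewrite | github.com/PedroGGC/LuminaCast | backend/app/services/scraper.py | _get_best_quality_url
-- ===== SOURCE A (Python) =====
-- def _get_best_quality_url(urls: list[str]) -> str | None:
--     """
--     Prioriza URLs por qualidade baseado no itag:
--     - itag=37: 1080p (prioridade máxima)
--     - itag=22: 720p
--     - itag=18: 360p (menor)
--     """
--     if not urls:
--         return None
--
--     best_url = urls[0]
--     highest_score = 0
--
--     for url in urls:
--         if "itag=37" in url:
--             return url
--         elif "itag=22" in url:
--             if highest_score < 2:
--                 best_url = url
--                 highest_score = 2
--         elif "itag=18" in url: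
--             if highest_score < 1:
--                 best_url = url
--                 highest_score = 1
--
--     return best_url
-- ===== SOURCE B (Python) =====
-- def _get_best_quality_url(urls: list[str]) -> str | None:
--     if not urls:
--         return None
--     for tag in ("itag=37", "itag=22", "itag=18"):
--         for url in urls:
--             if tag in url:
--                 return url
--     return urls[0]
-- ===== Notes on version B (the rewrite author's own statement) =====
-- stated objective: idiomatic
-- what changed: Replaced the single pass with a running best score by a priority-ordered scan: for each itag in priority order return the first matching url, falling back to urls[0].
import Mathlib
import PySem

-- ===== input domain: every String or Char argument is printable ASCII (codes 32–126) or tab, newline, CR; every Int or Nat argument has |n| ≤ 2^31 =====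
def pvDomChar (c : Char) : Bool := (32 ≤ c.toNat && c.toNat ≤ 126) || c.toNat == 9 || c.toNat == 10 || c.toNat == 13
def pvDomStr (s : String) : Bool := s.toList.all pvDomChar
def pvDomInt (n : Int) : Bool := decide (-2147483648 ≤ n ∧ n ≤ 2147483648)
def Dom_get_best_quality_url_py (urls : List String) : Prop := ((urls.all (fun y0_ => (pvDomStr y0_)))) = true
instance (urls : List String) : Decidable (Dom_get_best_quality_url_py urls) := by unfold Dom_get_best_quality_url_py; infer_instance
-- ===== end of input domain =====

-- B replaces A's single pass with a running best-score state by a priority-ordered scan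
-- (for each itag in priority order, return the first matching url; else urls[0]) — more idiomatic, same cost.



-- ===== PORT A =====
-- Loop with early return on "itag=37" and a running (best_url, highest_score) state.
def goA_get_best : List String → String → Int → String
  | [], best, _ => best
  | u :: rest, best, score =>
    if PySem.Str.isIn "itag=37" u then u
    else if PySem.Str.isIn "itag=22" u then
      if score < 2 then goA_get_best rest u 2 else goA_get_best rest best score
    else if PySem.Str.isIn "itag=18" u then
      if score < 1 then goA_get_best rest u 1 else goA_get_best rest best score
    else goA_get_best rest best score

def get_best_quality_url_py (urls : List String) : Option String :=
  match urls with
  | [] => none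
  | u :: _ => some (goA_get_best urls u 0)

-- ===== PORT B =====
-- first url containing tag (inner loop of Source B)
def findTag_get_best (tag : String) : List String → Option String
  | [] => none
  | u :: rest => if PySem.Str.isIn tag u then some u else findTag_get_best tag rest

-- outer loop over the priority tags
def scanTags_get_best : List String → List String → Option String
  | [], _ => none
  | t :: ts, urls =>
    match findTag_get_best t urls with
    | some u => some u
    | none => scanTags_get_best ts urls

def get_best_quality_url_py_alt (urls : List String) : Option String :=
  match urls with
  | [] => none
  | u :: _ =>
    match scanTags_get_best ["itag=37", "itag=22", "itag=18"] urls with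
    | some v => some v
    | none => some u

-- ===== PRECONDITION & SPEC =====
def Spec_get_best_quality_url_py (urls : List String) (out : Option String) : Prop := out = get_best_quality_url_py_alt urls
instance (urls : List String) (out : Option String) : Decidable (Spec_get_best_quality_url_py urls out) := by unfold Spec_get_best_quality_url_py; infer_instance

-- ===== CLAIM (what is proved, stated in full; the proofs are below) =====
def Claim_equal_get_best_quality_url_py : Prop := ∀ (urls : List String), Dom_get_best_quality_url_py urls → Spec_get_best_quality_url_py urls (get_best_quality_url_py urls)

-- ===== LEMMAS AND PROOFS =====

-- score = 2: only a "itag=37" url can change the result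
theorem goA_two (l : List String) (best : String) :
    goA_get_best l best 2 =
      (match findTag_get_best "itag=37" l with
       | some v => v
       | none => best) := by
  induction l generalizing best with
  | nil => simp [goA_get_best, findTag_get_best]
  | cons u rest ih =>
    simp only [goA_get_best, findTag_get_best]
    split_ifs with h37 h22 h18 <;> first | omega | rfl | simp [ih]

-- score = 1: first "itag=37", else first "itag=22", else best
theorem goA_one (l : List String) (best : String) :
    goA_get_best l best 1 =
      (match findTag_get_best "itag=37" l with
       | some v => v
       | none =>
         match findTag_get_best "itag=22" l with
         | some v => v
         | none => best) := by
  induction l generalizing best with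
  | nil => simp [goA_get_best, findTag_get_best]
  | cons u rest ih =>
    simp only [goA_get_best, findTag_get_best]
    split_ifs with h37 h22 h18 <;>
      first
      | omega
      | simp only [ih, goA_two]

-- score = 0 (the initial state): priority order 37, 22, 18, else best
theorem goA_zero (l : List String) (best : String) :
    goA_get_best l best 0 =
      (match findTag_get_best "itag=37" l with
       | some v => v
       | none =>
         match findTag_get_best "itag=22" l with
         | some v => v
         | none =>
           match findTag_get_best "itag=18" l with
           | some v => v
           | none => best) := by
  induction l generalizing best with
  | nil => simp [goA_get_best, findTag_get_best]
  | cons u rest ih =>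
    simp only [goA_get_best, findTag_get_best]
    split_ifs with h37 h22 h18 <;>
      first
      | omega
      | simp only [ih, goA_one, goA_two]

-- ===== VERDICT (by name: the statement is the Claim_ definition above) =====
theorem get_best_quality_url_py_spec : Claim_equal_get_best_quality_url_py := by
  intro urls _
  unfold Spec_get_best_quality_url_py
  match urls with
  | [] => rfl
  | u :: rest =>
    show some (goA_get_best (u :: rest) u 0) = _
    simp only [get_best_quality_url_py_alt, scanTags_get_best, goA_zero]
    cases findTag_get_best "itag=37" (u :: rest) <;>
      cases findTag_get_best "itag=22" (u :: rest) <;>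
        cases findTag_get_best "itag=18" (u :: rest) <;> rfl
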